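-- pv_equiv track=rewrite | github.com/lifemapper/lmtrex | lmtrex/frontend/reorder_fields.py | reorder_fields
-- ===== SOURCE A (Python) =====
-- field_order = {
--     'gbif:acceptedScientificName': {'after': 'dwc:scientificName'},
--     'dwc:datasetName': {'after': 'dwc:specificEpithet'},
-- }
--
-- def from_entries(entries):
--     return {key:value for key,value in entries}
--
-- def reorder_fields(mapped_table):
--     for field_name, position in field_order.items():
--         if field_name not in mapped_table:
--             continue
--
--         if 'after' not in position:
--             continue
--
--         if position['after'] not in mapped_table:
--             continue
--
--         table = list(mapped_table.items())
--         keys = list(mapped_table.keys())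
--         current_position = keys.index(field_name)
--         target_position = keys.index(position['after'])
--         current_entry = table.pop(current_position)
--         if current_position > target_position:
--             target_position += 1
--
--         table.insert(target_position, current_entry)
--         mapped_table = from_entries(table)
--
--     return mapped_table
-- ===== SOURCE B (Python) =====
-- field_order = {
--     'gbif:acceptedScientificName': {'after': 'dwc:scientificName'},
--     'dwc:datasetName': {'after': 'dwc:specificEpithet'},
-- }
--
-- def _move_after(mapped_table, field_name, after):
--     # One pass: copy every entry except field_name, re-emitting field_name
--     # right after the 'after' key; no indices, no pop/insert.
--     moved_value = mapped_table[field_name]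
--     entries = []
--     for key, value in mapped_table.items():
--         if key == field_name:
--             continue
--         entries.append((key, value))
--         if key == after:
--             entries.append((field_name, moved_value))
--     return dict(entries)
--
-- def reorder_fields(mapped_table):
--     for field_name, position in field_order.items():
--         after = position.get('after')
--         if field_name in mapped_table and after is not None and after in mapped_table:
--             mapped_table = _move_after(mapped_table, field_name, after)
--     return mapped_table
-- ===== Notes on version B (the rewrite author's own statement) =====
-- stated objective: simpler
-- what changed: B replaces A's index bookkeeping (keys.index, pop, the conditional off-by-one fix, insert) with a single pass over the entries that skips the moved field and re-emits it immediately after its 'after' key, rebuilding the dict from that order only when a rule fires.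
import Mathlib
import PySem

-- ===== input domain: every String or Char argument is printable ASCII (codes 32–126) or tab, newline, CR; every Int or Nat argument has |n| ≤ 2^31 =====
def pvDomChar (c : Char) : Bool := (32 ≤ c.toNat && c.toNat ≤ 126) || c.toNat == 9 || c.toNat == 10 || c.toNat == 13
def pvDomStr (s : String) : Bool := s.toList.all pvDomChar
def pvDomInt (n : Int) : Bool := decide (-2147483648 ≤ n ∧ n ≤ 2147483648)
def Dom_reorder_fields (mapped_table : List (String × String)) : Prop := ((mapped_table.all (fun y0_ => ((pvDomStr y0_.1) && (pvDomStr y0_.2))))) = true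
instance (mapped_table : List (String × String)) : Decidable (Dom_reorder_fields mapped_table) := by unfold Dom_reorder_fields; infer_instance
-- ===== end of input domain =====

-- B rebuilds the new key order in one pass (emit every entry except the moved field,
-- re-emitting it right after the 'after' key) instead of computing indices with
-- pop/insert; same cost, a simpler decomposition (no speed claim).

-- ===== PORT A =====
-- module constant field_order (each position is the dict {'after': …})
def field_order : List (String × List (String × String)) :=
  [("gbif:acceptedScientificName", [("after", "dwc:scientificName")]),
   ("dwc:datasetName", [("after", "dwc:specificEpithet")])]

-- from_entries: {key: value for key, value in entries} — fold of dict insert, read back as items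
def from_entries (entries : List (String × String)) : List (String × String) :=
  (entries.foldl (fun d p => PySem.Dict.insert d p.1 p.2) PySem.Dict.empty).items

-- one iteration of A's for-loop body (dict membership = key membership;
-- position['after'] = first match in the association list, exact for a dict)
def reorderStep (mapped_table : List (String × String)) (field_name : String)
    (position : List (String × String)) : List (String × String) :=
  if ¬ (mapped_table.map Prod.fst).contains field_name then mapped_table
  else if ¬ (position.map Prod.fst).contains "after" then mapped_table
  else
    match position.find? (fun p => p.1 == "after") with
    | none => mapped_table   -- unreachable: guarded by 'after' ∈ position
    | some pa =>
      if ¬ (mapped_table.map Prod.fst).contains pa.2 then mapped_table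
      else
        let keys := mapped_table.map Prod.fst
        match PySem.List.index? keys field_name, PySem.List.index? keys pa.2 with
        | some current_position, some target_position =>
          (match PySem.List.pop? mapped_table (current_position : Int) with
           | some (current_entry, table') =>
             from_entries (PySem.List.insert table'
               (((if current_position > target_position then target_position + 1
                  else target_position) : Nat) : Int) current_entry)
           | none => mapped_table)   -- unreachable: the index is in range
        | _, _ => mapped_table       -- unreachable: both keys are present

def reorder_fields (mapped_table : List (String × String)) : List (String × String) :=
  field_order.foldl (fun mt fp => reorderStep mt fp.1 fp.2) mapped_table

-- ===== PORT B =====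
-- _move_after from Source B: one pass building the entry list, then dict(entries)
def moveAfter (mapped_table : List (String × String)) (field_name after : String) :
    List (String × String) :=
  match mapped_table.find? (fun p => p.1 == field_name) with
  | none => mapped_table   -- unreachable: the caller checked membership
  | some pf =>
    from_entries (mapped_table.foldl (fun acc p =>
      if p.1 == field_name then acc
      else if p.1 == after then (acc ++ [p]) ++ [(field_name, pf.2)]
      else acc ++ [p]) [])

-- position.get('after') = first match in the association list, exact for a dict
def reorder_fields_alt (mapped_table : List (String × String)) : List (String × String) :=
  field_order.foldl (fun mt fp =>
    match (fp.2.find? (fun p => p.1 == "after")).map Prod.snd with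
    | some after =>
      if (mt.map Prod.fst).contains fp.1 && (mt.map Prod.fst).contains after then
        moveAfter mt fp.1 after
      else mt
    | none => mt) mapped_table

-- ===== PRECONDITION & SPEC =====
-- Pre_ excludes association lists with duplicate keys: A's parameter is a Python
-- dict, in which duplicate keys cannot exist (they collapse at dict construction),
-- so such lists represent no actual input of A.
def Pre_reorder_fields (mapped_table : List (String × String)) : Prop :=
  (mapped_table.map Prod.fst).Nodup
instance (mapped_table : List (String × String)) : Decidable (Pre_reorder_fields mapped_table) := by
  unfold Pre_reorder_fields; infer_instance

def pvWitness_reorder_fields : (List (String × String)) :=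
  [("dwc:scientificName", "Puma concolor"), ("gbif:acceptedScientificName", "x")]

def Spec_reorder_fields (mapped_table : List (String × String)) (out : List (String × String)) : Prop := out = reorder_fields_alt mapped_table
instance (mapped_table : List (String × String)) (out : List (String × String)) : Decidable (Spec_reorder_fields mapped_table out) := by unfold Spec_reorder_fields; infer_instance

-- ===== CLAIM (what is proved, stated in full; the proofs are below) =====
def Claim_equal_reorder_fields : Prop := ∀ (mapped_table : List (String × String)), Dom_reorder_fields mapped_table → Pre_reorder_fields mapped_table → Spec_reorder_fields mapped_table (reorder_fields mapped_table)

-- ===== LEMMAS AND PROOFS =====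

-- contains on the key list, stated as membership
theorem contains_keys_iff (l : List (String × String)) (k : String) :
    (l.map Prod.fst).contains k = true ↔ k ∈ l.map Prod.fst :=
  List.contains_iff_mem

-- erasing at the length of the prefix removes the middle element
theorem eraseIdx_append_cons {α : Type} (u r : List α) (x : α) :
    (u ++ x :: r).eraseIdx u.length = u ++ r := by
  induction u with
  | nil => simp
  | cons a u ih => simp [ih]

-- the element at the length of the prefix
theorem getElem_append_cons {α : Type} (u r : List α) (x : α) :
    (u ++ x :: r)[u.length]'(by simp) = x := by
  rw [List.getElem_append_right (Nat.le_refl _)]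
  simp

-- A's step, reduced on inputs where the rule fires
theorem reorderStep_red (mt : List (String × String)) (f t : String)
    (hct : (mt.map Prod.fst).contains t = true)
    (cp tp : Nat)
    (hif : PySem.List.index? (mt.map Prod.fst) f = some cp)
    (hit : PySem.List.index? (mt.map Prod.fst) t = some tp)
    (e : String × String) (tb : List (String × String))
    (hpop : PySem.List.pop? mt ((cp : Nat) : Int) = some (e, tb))
    (hcf : (mt.map Prod.fst).contains f = true) :
    reorderStep mt f [("after", t)]
      = from_entries (PySem.List.insert tb
          (((if cp > tp then tp + 1 else tp) : Nat) : Int) e) := by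
  unfold reorderStep
  rw [if_neg (fun h => h hcf)]
  rw [if_neg (by simp)]
  have hfindlit : ([("after", t)] : List (String × String)).find? (fun p => p.1 == "after")
      = some ("after", t) := by simp
  rw [hfindlit]
  show (if ¬ (mt.map Prod.fst).contains t = true then mt else _)
      = from_entries (PySem.List.insert tb (((if cp > tp then tp + 1 else tp) : Nat) : Int) e)
  rw [if_neg (fun h => h hct)]
  simp only [hif, hit, hpop]

-- A's step is the identity when the moved field is absent
theorem reorderStep_id_left (mt : List (String × String)) (f t : String)
    (hcf : (mt.map Prod.fst).contains f = false) :
    reorderStep mt f [("after", t)] = mt := by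
  unfold reorderStep
  rw [if_pos (by rw [hcf]; simp)]

-- A's step is the identity when the target key is absent
theorem reorderStep_id_right (mt : List (String × String)) (f t : String)
    (hct : (mt.map Prod.fst).contains t = false) :
    reorderStep mt f [("after", t)] = mt := by
  unfold reorderStep
  by_cases hcf : (mt.map Prod.fst).contains f = true
  · rw [if_neg (fun h => h hcf)]
    rw [if_neg (by simp)]
    have hfindlit : ([("after", t)] : List (String × String)).find? (fun p => p.1 == "after")
        = some ("after", t) := by simp
    rw [hfindlit]
    show (if ¬ (mt.map Prod.fst).contains t = true then mt else _) = mt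
    rw [if_pos (by rw [hct]; simp)]
  · rw [if_pos (by simpa using hcf)]

-- the per-entry contribution of B's rebuilding pass
def gmove (f t v : String) : String × String → List (String × String) :=
  fun p => if p.1 = f then [] else if p.1 = t then [p, (f, v)] else [p]

-- B's accumulator loop is a flatMap of gmove
theorem fold_entries_eq_flatMap (l : List (String × String)) (f t : String) (v : String) :
    l.foldl (fun acc p =>
      if p.1 == f then acc
      else if p.1 == t then (acc ++ [p]) ++ [(f, v)]
      else acc ++ [p]) []
    = l.flatMap (gmove f t v) := by
  have h : (fun (acc : List (String × String)) p =>
      if p.1 == f then acc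
      else if p.1 == t then (acc ++ [p]) ++ [(f, v)]
      else acc ++ [p])
    = (fun acc p => acc ++ gmove f t v p) := by
    funext acc p
    by_cases h1 : p.1 = f <;> by_cases h2 : p.1 = t
    · simp [gmove, h1, h2]
    · simp [gmove, h1, h2]
    · have htf : t ≠ f := fun hh => h1 (by rw [h2, hh])
      simp [gmove, h1, h2, htf]
    · simp [gmove, h1, h2]
  rw [h, PySem.List.foldl_append_eq_flatMap]
  simp

-- segments whose keys avoid f and t pass through gmove unchanged
theorem flatMap_avoid (l : List (String × String)) (f t v : String)
    (hf : f ∉ l.map Prod.fst) (ht : t ∉ l.map Prod.fst) :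
    l.flatMap (gmove f t v) = l := by
  induction l with
  | nil => rfl
  | cons p l ih =>
    simp only [List.map_cons, List.mem_cons, not_or] at hf ht
    simp [List.flatMap_cons, gmove, Ne.symm hf.1, Ne.symm ht.1, ih hf.2 ht.2]

-- from_entries is the identity on association lists with distinct keys
theorem from_entries_nodup (l : List (String × String)) (h : (l.map Prod.fst).Nodup) :
    from_entries l = l := by
  suffices H : ∀ (l : List (String × String)) (d : PySem.Dict String String),
      ((d.items.map Prod.fst) ++ (l.map Prod.fst)).Nodup →
      (l.foldl (fun d p => PySem.Dict.insert d p.1 p.2) d).items = d.items ++ l by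
    have := H l PySem.Dict.empty (by simpa [PySem.Dict.empty] using h)
    simpa [from_entries, PySem.Dict.empty] using this
  intro l
  induction l with
  | nil => intro d _; simp
  | cons p l ih =>
    intro d hnd
    have hcon : d.contains p.1 = false := by
      simp only [PySem.Dict.contains]
      simp only [List.map_append, List.map_cons, List.nodup_append] at hnd
      have hnm : p.1 ∉ d.items.map Prod.fst := by
        intro hmem
        exact hnd.2.2 p.1 hmem p.1 (by simp) rfl
      simp only [List.any_eq_false]
      intro q hq hbeq
      exact hnm (by simpa [(beq_iff_eq.mp hbeq)] using List.mem_map_of_mem (f := Prod.fst) hq)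
    have hins : (d.insert p.1 p.2).items = d.items ++ [p] := by
      rw [PySem.Dict.items_insert, hcon]
      simp
    simp only [List.foldl_cons]
    rw [ih (d.insert p.1 p.2) (by
      rw [hins]
      simp only [List.map_append, List.map_cons] at hnd ⊢
      simpa using hnd)]
    rw [hins]
    simp

-- a run of distinct keys, unpacked into the non-membership facts the step needs
theorem keys_facts (U M R : List String) (f t : String)
    (h : (U ++ f :: (M ++ t :: R)).Nodup) :
    f ∉ U ∧ f ∉ M ∧ f ∉ R ∧ t ∉ U ∧ t ∉ M ∧ t ∉ R ∧ f ≠ t := by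
  rw [List.nodup_append] at h
  obtain ⟨-, h2, hd⟩ := h
  rw [List.nodup_cons] at h2
  obtain ⟨hf, h3⟩ := h2
  rw [List.nodup_append] at h3
  obtain ⟨-, h4, hd2⟩ := h3
  rw [List.nodup_cons] at h4
  obtain ⟨ht, -⟩ := h4
  simp only [List.mem_append, List.mem_cons, not_or] at hf
  exact ⟨fun hh => hd f hh f (by simp) rfl, hf.1, hf.2.2,
    fun hh => hd t hh t (by simp) rfl, fun hh => hd2 t hh t (by simp) rfl, ht, hf.2.1⟩

-- find? skips pairs whose key differs from f
theorem find?_keys_none (l : List (String × String)) (f : String)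
    (h : f ∉ l.map Prod.fst) : l.find? (fun q => q.1 == f) = none := by
  rw [List.find?_eq_none]
  intro x hx
  simp only [beq_iff_eq]
  intro hh
  exact h (hh ▸ List.mem_map_of_mem (f := Prod.fst) hx)

-- f occurs before t: both steps yield f's entry re-inserted right after t's
theorem step_case1 (u m r : List (String × String)) (f t v w : String)
    (hft : f ≠ t)
    (hfU : f ∉ u.map Prod.fst) (hfM : f ∉ m.map Prod.fst) (hfR : f ∉ r.map Prod.fst)
    (htU : t ∉ u.map Prod.fst) (htM : t ∉ m.map Prod.fst) (htR : t ∉ r.map Prod.fst) :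
    reorderStep (u ++ (f,v) :: (m ++ (t,w) :: r)) f [("after", t)]
      = from_entries (u ++ (m ++ (t,w) :: (f,v) :: r))
    ∧ moveAfter (u ++ (f,v) :: (m ++ (t,w) :: r)) f t
      = from_entries (u ++ (m ++ (t,w) :: (f,v) :: r)) := by
  have hkeys : (u ++ (f,v) :: (m ++ (t,w) :: r)).map Prod.fst
      = u.map Prod.fst ++ f :: (m.map Prod.fst ++ t :: r.map Prod.fst) := by simp
  have hcf : ((u ++ (f,v) :: (m ++ (t,w) :: r)).map Prod.fst).contains f = true := by
    rw [contains_keys_iff, hkeys]; simp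
  have hct : ((u ++ (f,v) :: (m ++ (t,w) :: r)).map Prod.fst).contains t = true := by
    rw [contains_keys_iff, hkeys]; simp
  have hif : PySem.List.index? ((u ++ (f,v) :: (m ++ (t,w) :: r)).map Prod.fst) f
      = some u.length := by
    rw [hkeys, PySem.List.index?_eq_some_iff]
    exact ⟨u.map Prod.fst, _, rfl, by simp, hfU⟩
  have hit : PySem.List.index? ((u ++ (f,v) :: (m ++ (t,w) :: r)).map Prod.fst) t
      = some (u.length + m.length + 1) := by
    rw [hkeys, PySem.List.index?_eq_some_iff]
    refine ⟨u.map Prod.fst ++ f :: m.map Prod.fst, r.map Prod.fst, by simp,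
      by (simp only [List.length_append, List.length_cons, List.length_map]) <;> omega, ?_⟩
    simp only [List.mem_append, List.mem_cons, not_or]
    exact ⟨htU, Ne.symm hft, htM⟩
  have hpop : PySem.List.pop? (u ++ (f,v) :: (m ++ (t,w) :: r)) ((u.length : Nat) : Int)
      = some ((f,v), u ++ (m ++ (t,w) :: r)) := by
    rw [PySem.List.pop?_natCast _ _ (by simp)]
    rw [getElem_append_cons, eraseIdx_append_cons]
  have hins : PySem.List.insert (u ++ (m ++ (t,w) :: r)) ((u.length + m.length + 1 : Nat) : Int) (f,v)
      = u ++ (m ++ (t,w) :: (f,v) :: r) := by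
    have hre : u ++ (m ++ (t,w) :: r) = (u ++ m ++ [(t,w)]) ++ r := by simp
    rw [hre, PySem.List.insert_natCast _ _ _
      (by (simp only [List.length_append, List.length_cons, List.length_nil]) <;> omega)]
    rw [List.take_left' (by (simp only [List.length_append, List.length_cons, List.length_nil]) <;> omega),
        List.drop_left' (by (simp only [List.length_append, List.length_cons, List.length_nil]) <;> omega)]
    simp
  constructor
  · rw [reorderStep_red _ f t hct u.length (u.length + m.length + 1) hif hit _ _ hpop hcf]
    rw [if_neg (by omega), hins]
  · have hfind : (u ++ (f,v) :: (m ++ (t,w) :: r)).find? (fun q => q.1 == f) = some (f,v) := by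
      rw [List.find?_append, find?_keys_none u f hfU]
      simp [List.find?_cons]
    simp only [moveAfter, hfind]
    rw [fold_entries_eq_flatMap]
    have h1 : List.flatMap (gmove f t v) u = u := flatMap_avoid u f t v hfU htU
    have h2 : List.flatMap (gmove f t v) m = m := flatMap_avoid m f t v hfM htM
    have h3 : List.flatMap (gmove f t v) r = r := flatMap_avoid r f t v hfR htR
    have hgf : gmove f t v (f,v) = [] := by simp [gmove]
    have hgt' : gmove f t v (t,w) = [(t,w),(f,v)] := by simp [gmove, Ne.symm hft]
    simp [List.flatMap_append, List.flatMap_cons, h1, h2, h3, hgf, hgt']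

-- t occurs before f: both steps yield f's entry re-inserted right after t's
theorem step_case2 (u m r : List (String × String)) (f t v w : String)
    (hft : f ≠ t)
    (hfU : f ∉ u.map Prod.fst) (hfM : f ∉ m.map Prod.fst) (hfR : f ∉ r.map Prod.fst)
    (htU : t ∉ u.map Prod.fst) (htM : t ∉ m.map Prod.fst) (htR : t ∉ r.map Prod.fst) :
    reorderStep (u ++ (t,w) :: (m ++ (f,v) :: r)) f [("after", t)]
      = from_entries (u ++ (t,w) :: (f,v) :: (m ++ r))
    ∧ moveAfter (u ++ (t,w) :: (m ++ (f,v) :: r)) f t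
      = from_entries (u ++ (t,w) :: (f,v) :: (m ++ r)) := by
  have hkeys : (u ++ (t,w) :: (m ++ (f,v) :: r)).map Prod.fst
      = u.map Prod.fst ++ t :: (m.map Prod.fst ++ f :: r.map Prod.fst) := by simp
  have hcf : ((u ++ (t,w) :: (m ++ (f,v) :: r)).map Prod.fst).contains f = true := by
    rw [contains_keys_iff, hkeys]; simp
  have hct : ((u ++ (t,w) :: (m ++ (f,v) :: r)).map Prod.fst).contains t = true := by
    rw [contains_keys_iff, hkeys]; simp
  have hif : PySem.List.index? ((u ++ (t,w) :: (m ++ (f,v) :: r)).map Prod.fst) f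
      = some (u.length + m.length + 1) := by
    rw [hkeys, PySem.List.index?_eq_some_iff]
    refine ⟨u.map Prod.fst ++ t :: m.map Prod.fst, r.map Prod.fst, by simp,
      by (simp only [List.length_append, List.length_cons, List.length_map]) <;> omega, ?_⟩
    simp only [List.mem_append, List.mem_cons, not_or]
    exact ⟨hfU, hft, hfM⟩
  have hit : PySem.List.index? ((u ++ (t,w) :: (m ++ (f,v) :: r)).map Prod.fst) t
      = some u.length := by
    rw [hkeys, PySem.List.index?_eq_some_iff]
    exact ⟨u.map Prod.fst, _, rfl, by simp, htU⟩
  have hlen : (u ++ (t,w) :: m).length = u.length + m.length + 1 := by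
    (simp only [List.length_append, List.length_cons]) <;> omega
  have hpop : PySem.List.pop? (u ++ (t,w) :: (m ++ (f,v) :: r)) ((u.length + m.length + 1 : Nat) : Int)
      = some ((f,v), (u ++ (t,w) :: m) ++ r) := by
    have hre : u ++ (t,w) :: (m ++ (f,v) :: r) = (u ++ (t,w) :: m) ++ (f,v) :: r := by simp
    rw [hre, ← hlen, PySem.List.pop?_natCast _ _ (by simp)]
    rw [getElem_append_cons, eraseIdx_append_cons]
  have hins : PySem.List.insert ((u ++ (t,w) :: m) ++ r) ((u.length + 1 : Nat) : Int) (f,v)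
      = u ++ (t,w) :: (f,v) :: (m ++ r) := by
    have hre : (u ++ (t,w) :: m) ++ r = (u ++ [(t,w)]) ++ (m ++ r) := by simp
    rw [hre, PySem.List.insert_natCast _ _ _
      (by (simp only [List.length_append, List.length_cons, List.length_nil]) <;> omega)]
    rw [List.take_left' (by (simp only [List.length_append, List.length_cons, List.length_nil]) <;> omega),
        List.drop_left' (by (simp only [List.length_append, List.length_cons, List.length_nil]) <;> omega)]
    simp
  constructor
  · rw [reorderStep_red _ f t hct (u.length + m.length + 1) u.length hif hit _ _ hpop hcf]
    rw [if_pos (by omega), hins]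
  · have hfind : (u ++ (t,w) :: (m ++ (f,v) :: r)).find? (fun q => q.1 == f) = some (f,v) := by
      rw [List.find?_append, find?_keys_none u f hfU]
      have hstep : ((t,w) :: (m ++ (f,v) :: r)).find? (fun q => q.1 == f)
          = (m ++ (f,v) :: r).find? (fun q => q.1 == f) := by
        simp [List.find?_cons, Ne.symm hft]
      rw [hstep, List.find?_append, find?_keys_none m f hfM]
      simp [List.find?_cons]
    simp only [moveAfter, hfind]
    rw [fold_entries_eq_flatMap]
    have h1 : List.flatMap (gmove f t v) u = u := flatMap_avoid u f t v hfU htU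
    have h2 : List.flatMap (gmove f t v) m = m := flatMap_avoid m f t v hfM htM
    have h3 : List.flatMap (gmove f t v) r = r := flatMap_avoid r f t v hfR htR
    have hgf : gmove f t v (f,v) = [] := by simp [gmove]
    have hgt' : gmove f t v (t,w) = [(t,w),(f,v)] := by simp [gmove, Ne.symm hft]
    simp [List.flatMap_append, List.flatMap_cons, h1, h2, h3, hgf, hgt']

-- one rule application: A's step equals B's step, and permutes the entries
theorem step_main (mt : List (String × String)) (f t : String) (hft : f ≠ t)
    (hnd : (mt.map Prod.fst).Nodup) :
    reorderStep mt f [("after", t)]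
      = (if (mt.map Prod.fst).contains f && (mt.map Prod.fst).contains t then
          moveAfter mt f t else mt)
    ∧ (reorderStep mt f [("after", t)]).Perm mt := by
  by_cases hcf : ((mt.map Prod.fst).contains f) = true
  · by_cases hct : ((mt.map Prod.fst).contains t) = true
    · obtain ⟨pf, hpfm, hpf1⟩ := List.mem_map.mp (contains_keys_iff mt f |>.mp hcf)
      obtain ⟨u0, r0, hsplit⟩ := List.append_of_mem hpfm
      have hpfe : pf = (f, pf.2) := by rw [← hpf1]
      rw [hpfe] at hsplit
      have ht' : t ∈ mt.map Prod.fst := (contains_keys_iff mt t).mp hct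
      rw [hsplit] at ht'
      simp only [List.map_append, List.map_cons, List.mem_append, List.mem_cons] at ht'
      rw [if_pos (by rw [hcf, hct]; rfl)]
      rcases ht' with htU0 | htf | htR0
      · -- t occurs before f
        obtain ⟨pt, hptm, hpt1⟩ := List.mem_map.mp htU0
        obtain ⟨u, m, hsplit2⟩ := List.append_of_mem hptm
        have hpte : pt = (t, pt.2) := by rw [← hpt1]
        rw [hpte] at hsplit2
        rw [hsplit2] at hsplit
        have hsh : (u ++ (t, pt.2) :: m) ++ (f, pf.2) :: r0
            = u ++ (t, pt.2) :: (m ++ (f, pf.2) :: r0) := by simp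
        rw [hsh] at hsplit
        rw [hsplit] at hnd ⊢
        have hkf := keys_facts (u.map Prod.fst) (m.map Prod.fst) (r0.map Prod.fst) t f
          (by simpa using hnd)
        obtain ⟨htU, htM, htR, hfU, hfM, hfR, -⟩ := hkf
        have hc := step_case2 u m r0 f t pf.2 pt.2 hft hfU hfM hfR htU htM htR
        have hX : (u ++ (t, pt.2) :: (f, pf.2) :: (m ++ r0)).Perm
            (u ++ (t, pt.2) :: (m ++ (f, pf.2) :: r0)) :=
          List.Perm.append_left u ((List.perm_middle.symm).cons (t, pt.2))
        have hXnd : ((u ++ (t, pt.2) :: (f, pf.2) :: (m ++ r0)).map Prod.fst).Nodup :=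
          ((hX.map Prod.fst).nodup_iff).mpr hnd
        have hfe := from_entries_nodup _ hXnd
        exact ⟨hc.1.trans hc.2.symm, by rw [hc.1, hfe]; exact hX⟩
      · exact absurd htf.symm hft
      · -- t occurs after f
        obtain ⟨pt, hptm, hpt1⟩ := List.mem_map.mp htR0
        obtain ⟨m, r, hsplit2⟩ := List.append_of_mem hptm
        have hpte : pt = (t, pt.2) := by rw [← hpt1]
        rw [hpte] at hsplit2
        rw [hsplit2] at hsplit
        rw [hsplit] at hnd ⊢
        have hkf := keys_facts (u0.map Prod.fst) (m.map Prod.fst) (r.map Prod.fst) f t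
          (by simpa using hnd)
        obtain ⟨hfU, hfM, hfR, htU, htM, htR, -⟩ := hkf
        have hc := step_case1 u0 m r f t pf.2 pt.2 hft hfU hfM hfR htU htM htR
        have hX : (u0 ++ (m ++ (t, pt.2) :: (f, pf.2) :: r)).Perm
            (u0 ++ (f, pf.2) :: (m ++ (t, pt.2) :: r)) := by
          refine List.Perm.append_left u0 ?_
          refine (List.perm_middle (a := (t, pt.2)) (l₁ := m) (l₂ := (f, pf.2) :: r)).trans ?_
          refine ((List.perm_middle (a := (f, pf.2)) (l₁ := m) (l₂ := r)).cons (t, pt.2)).trans ?_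
          refine (List.Perm.swap (f, pf.2) (t, pt.2) (m ++ r)).trans ?_
          exact ((List.perm_middle (a := (t, pt.2)) (l₁ := m) (l₂ := r)).symm.cons (f, pf.2))
        have hXnd : ((u0 ++ (m ++ (t, pt.2) :: (f, pf.2) :: r)).map Prod.fst).Nodup :=
          ((hX.map Prod.fst).nodup_iff).mpr hnd
        have hfe := from_entries_nodup _ hXnd
        exact ⟨hc.1.trans hc.2.symm, by rw [hc.1, hfe]; exact hX⟩
    · have hct' : (mt.map Prod.fst).contains t = false := by
        exact Bool.not_eq_true _ ▸ (by simpa using hct)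
      refine ⟨?_, ?_⟩
      · rw [reorderStep_id_right mt f t hct', if_neg (by rw [hct']; simp)]
      · rw [reorderStep_id_right mt f t hct']
  · have hcf' : (mt.map Prod.fst).contains f = false := by
      exact Bool.not_eq_true _ ▸ (by simpa using hcf)
    refine ⟨?_, ?_⟩
    · rw [reorderStep_id_left mt f t hcf', if_neg (by rw [hcf']; simp)]
    · rw [reorderStep_id_left mt f t hcf']

-- ===== VERDICT (by name: the statement is the Claim_ definition above) =====
theorem reorder_fields_spec : Claim_equal_reorder_fields := by
  intro mt _ hpre
  unfold Spec_reorder_fields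
  have h1 := step_main mt "gbif:acceptedScientificName" "dwc:scientificName" (by decide) hpre
  have hpre1 : ((reorderStep mt "gbif:acceptedScientificName"
      [("after", "dwc:scientificName")]).map Prod.fst).Nodup :=
    ((h1.2.map Prod.fst).nodup_iff).mpr hpre
  have h2 := step_main (reorderStep mt "gbif:acceptedScientificName"
      [("after", "dwc:scientificName")]) "dwc:datasetName" "dwc:specificEpithet" (by decide) hpre1
  show reorderStep (reorderStep mt "gbif:acceptedScientificName"
      [("after", "dwc:scientificName")]) "dwc:datasetName" [("after", "dwc:specificEpithet")]
    = (if (((if ((mt.map Prod.fst).contains "gbif:acceptedScientificName" && (mt.map Prod.fst).contains "dwc:scientificName") = true then moveAfter mt "gbif:acceptedScientificName" "dwc:scientificName" else mt).map Prod.fst).contains "dwc:datasetName"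
          && ((if ((mt.map Prod.fst).contains "gbif:acceptedScientificName" && (mt.map Prod.fst).contains "dwc:scientificName") = true then moveAfter mt "gbif:acceptedScientificName" "dwc:scientificName" else mt).map Prod.fst).contains "dwc:specificEpithet") = true then
        moveAfter (if ((mt.map Prod.fst).contains "gbif:acceptedScientificName" && (mt.map Prod.fst).contains "dwc:scientificName") = true then moveAfter mt "gbif:acceptedScientificName" "dwc:scientificName" else mt) "dwc:datasetName" "dwc:specificEpithet"
      else (if ((mt.map Prod.fst).contains "gbif:acceptedScientificName" && (mt.map Prod.fst).contains "dwc:scientificName") = true then moveAfter mt "gbif:acceptedScientificName" "dwc:scientificName" else mt))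
  rw [h2.1, h1.1]
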